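-- pv_equiv track=rewrite | github.com/1eesungeun/bias-detector-job-ads | app.py | group_hits_by_label
-- ===== SOURCE A (Python) =====
-- def group_hits_by_label(lex_hits: list, rule_hits: list):
--     grouped = {}
--     for h in (lex_hits or []):
--         lb = h.get("category", "bias")
--         grouped.setdefault(lb, []).append(h.get("term", ""))
--     for h in (rule_hits or []):
--         lb = h.get("category", "bias")
--         grouped.setdefault(lb, []).append(h.get("term", ""))
--     # Remove duplicates.
--     for lb, terms in grouped.items():
--         seen = set(); dedup = []
--         for t in terms:
--             if t not in seen:
--                 dedup.append(t); seen.add(t)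
--         grouped[lb] = dedup
--     return grouped
-- ===== SOURCE B (Python) =====
-- def group_hits_by_label(lex_hits: list, rule_hits: list):
--     # One fused pass: group and deduplicate together (membership test on the bucket itself).
--     grouped = {}
--     for h in (lex_hits or []) + (rule_hits or []):
--         bucket = grouped.setdefault(h.get("category", "bias"), [])
--         term = h.get("term", "")
--         if term not in bucket:
--             bucket.append(term)
--     return grouped
-- ===== Notes on version B (the rewrite author's own statement) =====
-- stated objective: simpler
-- what changed: Replaces A's two grouping loops plus a separate dedup-with-seen-set pass over grouped.items() by one fused loop over the concatenated hits that appends a term only if it is not already in its bucket; the second pass and the seen sets disappear.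
import Mathlib
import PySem

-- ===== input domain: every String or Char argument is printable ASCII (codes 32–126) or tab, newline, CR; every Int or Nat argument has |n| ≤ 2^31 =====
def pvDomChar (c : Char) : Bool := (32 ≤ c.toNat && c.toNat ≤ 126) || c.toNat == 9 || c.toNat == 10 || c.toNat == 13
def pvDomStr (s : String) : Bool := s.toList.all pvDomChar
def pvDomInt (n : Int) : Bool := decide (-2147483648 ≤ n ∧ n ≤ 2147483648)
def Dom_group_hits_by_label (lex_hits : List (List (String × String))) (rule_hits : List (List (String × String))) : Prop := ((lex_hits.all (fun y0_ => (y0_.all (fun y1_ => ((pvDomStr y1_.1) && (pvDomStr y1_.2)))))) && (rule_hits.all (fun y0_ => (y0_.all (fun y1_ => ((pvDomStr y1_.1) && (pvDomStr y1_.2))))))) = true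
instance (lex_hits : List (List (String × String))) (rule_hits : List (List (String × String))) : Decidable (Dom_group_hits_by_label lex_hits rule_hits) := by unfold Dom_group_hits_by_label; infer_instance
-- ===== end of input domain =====

-- B fuses A's two grouping loops and separate dedup pass into one loop that appends a term
-- only if it is not already in its bucket (objective: simpler, same asymptotic cost).

-- ===== PORT A =====
-- h.get(key, dflt): first-match lookup in a hit's association list (exact: Python dict keys are unique)
def hget : List (String × String) → String → String → String
  | [], _, dflt => dflt
  | (k, v) :: rest, key, dflt => if k = key then v else hget rest key dflt

-- grouped.setdefault(lb, []).append(t): append at the first entry with key lb, or add a new entry at the end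
def pushAt : List (String × List String) → String → String → List (String × List String)
  | [], lb, t => [(lb, [t])]
  | (k, v) :: rest, lb, t =>
      if k = lb then (k, v ++ [t]) :: rest else (k, v) :: pushAt rest lb t

def stepA (d : List (String × List String)) (h : List (String × String)) : List (String × List String) :=
  pushAt d (hget h "category" "bias") (hget h "term" "")

-- A's third loop body: seen = set(); dedup = []; for t in terms: if t not in seen: append/add
def dedupPass (terms : List String) : List String :=
  (terms.foldl
      (fun (p : PySem.Set String × List String) t =>
        if PySem.Set.contains p.1 t then p else (PySem.Set.add p.1 t, p.2 ++ [t]))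
      (PySem.Set.empty, [])).2

def group_hits_by_label (lex_hits : List (List (String × String))) (rule_hits : List (List (String × String))) : List (String × List String) :=
  let grouped := lex_hits.foldl stepA []
  let grouped := rule_hits.foldl stepA grouped
  -- for lb, terms in grouped.items(): grouped[lb] = dedup — each (unique) key is rewritten once,
  -- in place, in order: exact as a map over the entries
  grouped.map (fun p => (p.1, dedupPass p.2))

-- ===== PORT B =====
-- bucket = grouped.setdefault(lb, []); if t not in bucket: bucket.append(t)
def pushIfNew : List (String × List String) → String → String → List (String × List String)
  | [], lb, t => [(lb, [t])]
  | (k, v) :: rest, lb, t =>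
      if k = lb then (if t ∈ v then (k, v) :: rest else (k, v ++ [t]) :: rest)
      else (k, v) :: pushIfNew rest lb t

def group_hits_by_label_alt (lex_hits : List (List (String × String))) (rule_hits : List (List (String × String))) : List (String × List String) :=
  (lex_hits ++ rule_hits).foldl
    (fun grouped h => pushIfNew grouped (hget h "category" "bias") (hget h "term" "")) []

-- ===== PRECONDITION & SPEC =====
def Spec_group_hits_by_label (lex_hits : List (List (String × String))) (rule_hits : List (List (String × String))) (out : List (String × List String)) : Prop := out = group_hits_by_label_alt lex_hits rule_hits
instance (lex_hits : List (List (String × String))) (rule_hits : List (List (String × String))) (out : List (String × List String)) : Decidable (Spec_group_hits_by_label lex_hits rule_hits out) := by unfold Spec_group_hits_by_label; infer_instance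

-- ===== CLAIM (what is proved, stated in full; the proofs are below) =====
def Claim_equal_group_hits_by_label : Prop := ∀ (lex_hits : List (List (String × String))) (rule_hits : List (List (String × String))), Dom_group_hits_by_label lex_hits rule_hits → Spec_group_hits_by_label lex_hits rule_hits (group_hits_by_label lex_hits rule_hits)

-- ===== LEMMAS AND PROOFS =====

-- the dedup fold's seen set always has exactly the members of the accumulated list
lemma contains_dfold (terms : List String) :
    ∀ (s : PySem.Set String) (a : List String),
      (∀ x, PySem.Set.contains s x = decide (x ∈ a)) →
      ∀ x,
        PySem.Set.contains
            (terms.foldl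
              (fun (p : PySem.Set String × List String) t =>
                if PySem.Set.contains p.1 t then p else (PySem.Set.add p.1 t, p.2 ++ [t]))
              (s, a)).1 x
          = decide (x ∈ (terms.foldl
              (fun (p : PySem.Set String × List String) t =>
                if PySem.Set.contains p.1 t then p else (PySem.Set.add p.1 t, p.2 ++ [t]))
              (s, a)).2) := by
  induction terms with
  | nil => intro s a H x; simpa using H x
  | cons t ts ih =>
    intro s a H x
    simp only [List.foldl_cons]
    by_cases ht : PySem.Set.contains s t = true
    · rw [if_pos ht]; exact ih s a H x
    · rw [if_neg ht]
      refine ih _ _ ?_ x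
      intro y
      have hmem : y ∈ PySem.Set.add s t ↔ y ∈ a ++ [t] := by
        rw [PySem.Set.mem_add, List.mem_append, List.mem_singleton]
        have hy : y ∈ s ↔ y ∈ a := by
          have := H y
          constructor
          · intro hs
            have : PySem.Set.contains s y = true := (PySem.Set.contains_iff s y).mpr hs
            rw [H y] at this; exact of_decide_eq_true this
          · intro ha
            have : PySem.Set.contains s y = true := by rw [H y]; exact decide_eq_true ha
            exact (PySem.Set.contains_iff _ y).mp this
        rw [hy]
      rcases hc : PySem.Set.contains (PySem.Set.add s t) y with _ | _
      · have : y ∉ PySem.Set.add s t := fun h =>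
          by rw [(PySem.Set.contains_iff _ y).mpr h] at hc; cases hc
        simp [hmem.not.mp this]
      · have : y ∈ a ++ [t] := hmem.mp ((PySem.Set.contains_iff _ y).mp hc)
        simp [this]

-- appending one term commutes with the dedup pass
lemma dedupPass_snoc (v : List String) (t : String) :
    dedupPass (v ++ [t]) = if t ∈ dedupPass v then dedupPass v else dedupPass v ++ [t] := by
  unfold dedupPass
  rw [List.foldl_append]
  have hC := contains_dfold v PySem.Set.empty []
    (by intro x; simp [PySem.Set.empty, PySem.Set.contains]) t
  simp only [List.foldl_cons, List.foldl_nil]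
  by_cases ht : t ∈ (List.foldl
      (fun (p : PySem.Set String × List String) t =>
        if PySem.Set.contains p.1 t then p else (PySem.Set.add p.1 t, p.2 ++ [t]))
      (PySem.Set.empty, []) v).2
  · rw [if_pos ht]
    rw [decide_eq_true ht] at hC
    rw [if_pos hC]
  · rw [if_neg ht]
    rw [decide_eq_false ht] at hC
    rw [if_neg (by rw [hC]; exact Bool.false_ne_true)]

def dedupDict (d : List (String × List String)) : List (String × List String) :=
  d.map (fun p => (p.1, dedupPass p.2))

-- one A-step after dedup equals one B-step on the dedup'd dict
lemma dedupDict_pushAt (d : List (String × List String)) (lb t : String) :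
    dedupDict (pushAt d lb t) = pushIfNew (dedupDict d) lb t := by
  induction d with
  | nil => simp [dedupDict, pushAt, pushIfNew, dedupPass, PySem.Set.contains, PySem.Set.empty, PySem.Set.add]
  | cons p rest ih =>
    obtain ⟨k, v⟩ := p
    by_cases hk : k = lb
    · simp only [dedupDict, pushAt, pushIfNew, if_pos hk, List.map_cons]
      rw [dedupPass_snoc]
      split_ifs with hmem <;> simp
    · simp only [dedupDict, pushAt, pushIfNew, if_neg hk, List.map_cons] at *
      simp [ih]

-- the whole A fold after dedup equals the whole B fold
lemma dedupDict_foldl (hits : List (List (String × String))) :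
    ∀ d, dedupDict (hits.foldl stepA d)
      = hits.foldl (fun g h => pushIfNew g (hget h "category" "bias") (hget h "term" "")) (dedupDict d) := by
  induction hits with
  | nil => intro d; rfl
  | cons h hs ih =>
    intro d
    simp only [List.foldl_cons]
    rw [ih, stepA, dedupDict_pushAt]

-- ===== VERDICT (by name: the statement is the Claim_ definition above) =====
theorem group_hits_by_label_spec : Claim_equal_group_hits_by_label := by
  intro lex rule _
  unfold Spec_group_hits_by_label group_hits_by_label group_hits_by_label_alt
  rw [List.foldl_append]
  have := dedupDict_foldl (lex ++ rule) []
  rw [List.foldl_append] at this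
  simpa [dedupDict] using this
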